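-- pv_equiv track=rewrite | github.com/O8-O/IOU-ML | segmentation.py | get_around_largest_area
-- ===== SOURCE A (Python) =====
-- dir_x = [0, 0, 1, -1]
--
-- dir_y = [1, -1, 0, 0]
--
-- def can_go(x, y, height, width, direction=None, x_diff=False, y_diff=False):
-- 	'''
-- 	주어진 범위 밖으로 나가는지 체크
-- 	x , y : 시작 좌표
-- 	height, width : 세로와 가로 길이
-- 	direction : 방향 index of [동, 서, 남, 북]
-- 	x_diff, y_diff : 만약 특정 길이만큼 이동시, 범위 밖인지 체크하고 싶을 때.
-- 	'''
-- 	if direction == None: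
-- 		x_check = x + x_diff > -1 and x + x_diff < height
-- 		y_check = y + y_diff > -1 and y + y_diff < width
-- 	else:
-- 		x_check = x + dir_x[direction] > -1 and x + dir_x[direction] < height
-- 		y_check = y + dir_y[direction] > -1 and y + dir_y[direction] < width
-- 	return x_check and y_check
--
-- def get_around_pixel_list(divided_class, width, height, w, h):
-- 	class_kind = []
-- 	class_number = []
-- 	class_coord = []
-- 	for diff in [(0, -1), (0, 1), (1, -1), (1, 0), (1, 1), (-1, -1), (-1, 0), (-1, 1)]:
-- 		if can_go(h, w, height, width, x_diff=diff[0], y_diff=diff[1]):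
-- 			if divided_class[h + diff[0]][w + diff[1]] in class_kind:
-- 				class_number[class_kind.index(divided_class[h + diff[0]][w + diff[1]])] += 1
-- 				class_coord[class_kind.index(divided_class[h + diff[0]][w + diff[1]])].append((w + diff[1], h + diff[0]))
-- 			else:
-- 				class_kind.append(divided_class[h + diff[0]][w + diff[1]])
-- 				class_number.append(0)
-- 				class_coord.append([(w + diff[1], h + diff[0])])
-- 	return class_kind, class_number, class_coord
--
-- def get_around_largest_area(divided_class, width, height, class_border, my_class):
-- 	'''
-- 	근처의 영역 중에 가장 많이 자신과 붙어있는 영역의 Class Number를 Return.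
-- 	'''
-- 	total_kind = []
-- 	total_number = []
-- 	total_coord = []
--
-- 	for coord in class_border:
-- 		class_kind, class_number, class_coord = get_around_pixel_list(divided_class, width, height, coord[0], coord[1])
-- 		# 모든 Return 값에 대해서
-- 		for ck in class_kind:
-- 			# 이미 있던거면 class coord 가 있던건지 체크해서 입력
-- 			if ck in total_kind:
-- 				ck_index = total_kind.index(ck)
-- 				for cc in class_coord[class_kind.index(ck)]:
-- 					# 모든 coord return 값에 대해서 없는것만 추가하고 숫자를 늘림.
-- 					if cc not in total_coord[ck_index]:
-- 						total_number[ck_index] += 1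
-- 						total_coord[ck_index].append(cc)
-- 			else:
-- 				# 처음 나온 Class 면 추가한다.
-- 				ck_index = class_kind.index(ck)
-- 				total_kind.append(ck)
-- 				total_number.append(class_number[ck_index])
-- 				total_coord.append(class_coord[ck_index])
--
-- 	largest_number = -1
-- 	largest_index = -1
-- 	for i in range(len(total_number)):
-- 		# 자신이 아닌 가장 큰 Class를 뽑아온다.
-- 		if total_number[i] > largest_number and total_kind[i] != my_class:
-- 			largest_number = total_number[i]
-- 			largest_index = i
--
-- 	if largest_number == -1:
-- 		return -1
-- 	return total_kind[largest_index]
-- ===== SOURCE B (Python) =====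
-- def get_around_largest_area(divided_class, width, height, class_border, my_class):
-- 	'''
-- 	Single collection pass: build an insertion-ordered dict class -> set of
-- 	adjacent coords, then score each class as len(coords) - 1.
-- 	'''
-- 	coords_by_class = {}
-- 	for w, h in class_border:
-- 		for dx, dy in ((0, -1), (0, 1), (1, -1), (1, 0), (1, 1), (-1, -1), (-1, 0), (-1, 1)):
-- 			nh, nw = h + dx, w + dy
-- 			if 0 <= nh < height and 0 <= nw < width:
-- 				coords_by_class.setdefault(divided_class[nh][nw], set()).add((nw, nh))
-- 	best_class, best_score = -1, -1
-- 	for c, coords in coords_by_class.items():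
-- 		if c != my_class and len(coords) - 1 > best_score:
-- 			best_class, best_score = c, len(coords) - 1
-- 	return best_class
-- ===== Notes on version B (the rewrite author's own statement) =====
-- stated objective: simpler
-- what changed: Replaces A's per-pixel grouped triple of parallel lists (kinds/numbers/coords built by get_around_pixel_list) and its incremental merge-with-dedup loops by one flat pass that files each in-bounds neighbour coordinate into an insertion-ordered dict class -> set of coords, then scores each class as len(coords)-1 and returns the first strict maximum over non-my_class entries.
import Mathlib
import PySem

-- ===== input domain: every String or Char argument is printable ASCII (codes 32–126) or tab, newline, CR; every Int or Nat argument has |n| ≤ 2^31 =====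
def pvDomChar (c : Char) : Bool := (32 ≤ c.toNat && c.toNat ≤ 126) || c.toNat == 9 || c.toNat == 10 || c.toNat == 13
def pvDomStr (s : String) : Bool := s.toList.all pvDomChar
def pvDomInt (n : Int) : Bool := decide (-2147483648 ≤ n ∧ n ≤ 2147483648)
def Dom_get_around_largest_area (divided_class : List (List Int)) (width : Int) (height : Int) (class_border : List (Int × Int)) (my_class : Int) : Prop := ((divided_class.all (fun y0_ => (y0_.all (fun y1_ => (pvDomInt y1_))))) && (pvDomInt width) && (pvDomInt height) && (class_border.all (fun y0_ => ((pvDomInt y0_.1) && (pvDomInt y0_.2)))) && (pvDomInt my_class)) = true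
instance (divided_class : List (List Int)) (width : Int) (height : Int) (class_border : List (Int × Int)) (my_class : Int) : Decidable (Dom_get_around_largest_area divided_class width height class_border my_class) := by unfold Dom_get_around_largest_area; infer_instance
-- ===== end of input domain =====

-- B replaces A's per-pixel grouping + merge-dedup of parallel lists by one flat pass into a
-- dict class -> set-of-coords, scored as len-1; objective: simpler. Equal on Pre_ (A raises
-- IndexError outside it).

-- ===== PORT A =====
-- shared state type of A's three parallel lists (class_kind, class_number, class_coord)
abbrev PvTrip := List Int × List Int × List (List (Int × Int))

def pvDirX : List Int := [0, 0, 1, -1]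
def pvDirY : List Int := [1, -1, 0, 0]

def can_go (x y : Int) (height width : Int) (direction : Option Int) (x_diff y_diff : Int) : Bool :=
  match direction with
  | none =>
      let x_check := decide (x + x_diff > -1) && decide (x + x_diff < height)
      let y_check := decide (y + y_diff > -1) && decide (y + y_diff < width)
      x_check && y_check
  | some d =>
      let x_check := decide (x + PySem.List.pyGetD pvDirX d 0 > -1) && decide (x + PySem.List.pyGetD pvDirX d 0 < height)
      let y_check := decide (y + PySem.List.pyGetD pvDirY d 0 > -1) && decide (y + PySem.List.pyGetD pvDirY d 0 < width)
      x_check && y_check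

def pvDiffs : List (Int × Int) := [(0,-1),(0,1),(1,-1),(1,0),(1,1),(-1,-1),(-1,0),(-1,1)]

-- divided_class[i][j]; exact under Pre_ (Python raises IndexError outside it)
def pvCell (dc : List (List Int)) (i j : Int) : Int :=
  PySem.List.pyGetD (PySem.List.pyGetD dc i []) j 0

-- the body of A's per-pixel loop for one neighbour event (class value, coord)
def pvGroupStep (s : PvTrip) (e : Int × (Int × Int)) : PvTrip :=
  match PySem.List.index? s.1 e.1 with
  | some i => (s.1, s.2.1.set i (s.2.1.getD i 0 + 1), s.2.2.set i (s.2.2.getD i [] ++ [e.2]))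
  | none => (s.1 ++ [e.1], s.2.1 ++ [0], s.2.2 ++ [[e.2]])

def get_around_pixel_list (divided_class : List (List Int)) (width height w h : Int) : PvTrip :=
  pvDiffs.foldl (fun s diff =>
    if can_go h w height width none diff.1 diff.2 then
      pvGroupStep s (pvCell divided_class (h + diff.1) (w + diff.2), (w + diff.2, h + diff.1))
    else s) ([], [], [])

-- the body of A's innermost merge loop: dedup-append coord cc into total entry ti
def pvIcd (ti : Nat) (t : PvTrip) (cc : Int × Int) : PvTrip :=
  if cc ∈ t.2.2.getD ti [] then t
  else (t.1, t.2.1.set ti (t.2.1.getD ti 0 + 1), t.2.2.set ti (t.2.2.getD ti [] ++ [cc]))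

-- A's merge of one class ck of a pixel triple pix into the running totals t
def pvMergeClass (pix : PvTrip) (t : PvTrip) (ck : Int) : PvTrip :=
  match PySem.List.index? t.1 ck with
  | some ti => (pix.2.2.getD ((PySem.List.index? pix.1 ck).getD 0) []).foldl (pvIcd ti) t
  | none =>
      let i := (PySem.List.index? pix.1 ck).getD 0
      (t.1 ++ [ck], t.2.1 ++ [pix.2.1.getD i 0], t.2.2 ++ [pix.2.2.getD i []])

def get_around_largest_area (divided_class : List (List Int)) (width : Int) (height : Int) (class_border : List (Int × Int)) (my_class : Int) : Int :=
  let total : PvTrip := class_border.foldl (fun t coord =>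
      let pix := get_around_pixel_list divided_class width height coord.1 coord.2
      pix.1.foldl (pvMergeClass pix) t) ([], [], [])
  let sel := (PySem.List.pyRange 0 (total.2.1.length : Int) 1).foldl (fun st i =>
      if PySem.List.pyGetD total.2.1 i 0 > st.1 ∧ PySem.List.pyGetD total.1 i 0 ≠ my_class then
        (PySem.List.pyGetD total.2.1 i 0, i)
      else st) (-1, -1)
  if sel.1 = -1 then -1 else PySem.List.pyGetD total.1 sel.2 0

-- ===== PORT B =====
-- Source B: coords_by_class.setdefault(c, set()).add((nw, nh))
def pvAddCoord (dc : List (List Int)) (d : PySem.Dict Int (List (Int × Int))) (e : Int × Int) (q : Int × Int) : PySem.Dict Int (List (Int × Int)) :=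
  let c := pvCell dc (e.2 + q.1) (e.1 + q.2)
  d.insert c (PySem.Set.add (d.getD c []) (e.1 + q.2, e.2 + q.1))

def get_around_largest_area_alt (divided_class : List (List Int)) (width : Int) (height : Int) (class_border : List (Int × Int)) (my_class : Int) : Int :=
  let d : PySem.Dict Int (List (Int × Int)) := class_border.foldl (fun d p =>
    pvDiffs.foldl (fun d q =>
      if decide (0 ≤ p.2 + q.1) && decide (p.2 + q.1 < height) && decide (0 ≤ p.1 + q.2) && decide (p.1 + q.2 < width) then
        pvAddCoord divided_class d p q
      else d) d) PySem.Dict.empty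
  let sel := d.items.foldl (fun st it =>
      if it.1 ≠ my_class ∧ (it.2.length : Int) - 1 > st.2 then (it.1, (it.2.length : Int) - 1) else st) ((-1 : Int), (-1 : Int))
  sel.1

-- ===== PRECONDITION & SPEC =====
-- Pre_: every in-bounds (per width/height) neighbour of a border pixel must actually exist in
-- divided_class; outside Pre_ the Python A raises IndexError.
def Pre_get_around_largest_area (divided_class : List (List Int)) (width : Int) (height : Int) (class_border : List (Int × Int)) (my_class : Int) : Prop :=
  ∀ p ∈ class_border, ∀ q ∈ pvDiffs,
    (0 ≤ p.2 + q.1 ∧ p.2 + q.1 < height ∧ 0 ≤ p.1 + q.2 ∧ p.1 + q.2 < width) →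
    p.2 + q.1 < (divided_class.length : Int) ∧
    p.1 + q.2 < ((divided_class.getD (p.2 + q.1).toNat []).length : Int)
instance (divided_class : List (List Int)) (width : Int) (height : Int) (class_border : List (Int × Int)) (my_class : Int) : Decidable (Pre_get_around_largest_area divided_class width height class_border my_class) := by unfold Pre_get_around_largest_area; infer_instance

def pvWitness_get_around_largest_area : List (List Int) × Int × Int × (List (Int × Int)) × Int :=
  ([[0, 1], [1, 0]], 2, 2, [(0, 0), (1, 1)], 0)

def Spec_get_around_largest_area (divided_class : List (List Int)) (width : Int) (height : Int) (class_border : List (Int × Int)) (my_class : Int) (out : Int) : Prop := out = get_around_largest_area_alt divided_class width height class_border my_class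
instance (divided_class : List (List Int)) (width : Int) (height : Int) (class_border : List (Int × Int)) (my_class : Int) (out : Int) : Decidable (Spec_get_around_largest_area divided_class width height class_border my_class out) := by unfold Spec_get_around_largest_area; infer_instance

-- ===== CLAIM (what is proved, stated in full; the proofs are below) =====
def Claim_equal_get_around_largest_area : Prop := ∀ (divided_class : List (List Int)) (width : Int) (height : Int) (class_border : List (Int × Int)) (my_class : Int), Dom_get_around_largest_area divided_class width height class_border my_class → Pre_get_around_largest_area divided_class width height class_border my_class → Spec_get_around_largest_area divided_class width height class_border my_class (get_around_largest_area divided_class width height class_border my_class)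

-- ===== LEMMAS AND PROOFS =====

-- the flat list of neighbour events (class value, coord) of one border pixel
def pvGuardQ (width height : Int) (p q : Int × Int) : Bool :=
  decide (0 ≤ p.2 + q.1) && decide (p.2 + q.1 < height) && decide (0 ≤ p.1 + q.2) && decide (p.1 + q.2 < width)

def pixEvents (dc : List (List Int)) (width height : Int) (p : Int × Int) : List (Int × (Int × Int)) :=
  (pvDiffs.filter (pvGuardQ width height p)).map
    (fun q => (pvCell dc (p.2 + q.1) (p.1 + q.2), (p.1 + q.2, p.2 + q.1)))

-- single-event version of A's merge (with cross-pixel dedup)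
def tripStep (t : PvTrip) (e : Int × (Int × Int)) : PvTrip :=
  match PySem.List.index? t.1 e.1 with
  | some i => pvIcd i t e.2
  | none => (t.1 ++ [e.1], t.2.1 ++ [0], t.2.2 ++ [[e.2]])

def dictStep (d : PySem.Dict Int (List (Int × Int))) (e : Int × (Int × Int)) : PySem.Dict Int (List (Int × Int)) :=
  d.insert e.1 (PySem.Set.add (d.getD e.1 []) e.2)

def pvLenInv (t : PvTrip) : Prop := t.2.1.length = t.1.length ∧ t.2.2.length = t.1.length
def pvInv (t : PvTrip) : Prop := t.1.Nodup ∧ pvLenInv t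

-- relation between A's running triple and B's running dict
def pvRel (t : PvTrip) (d : PySem.Dict Int (List (Int × Int))) : Prop :=
  d.items = t.1.zip t.2.2 ∧ t.2.1 = t.2.2.map (fun l => (l.length : Int) - 1) ∧ pvInv t


-- --- small list helpers ---
theorem pvGetD_set_ne {α : Type} [Inhabited α] (l : List α) (i j : Nat) (v d : α) (h : j ≠ i) :
    (l.set i v).getD j d = l.getD j d := by
  simp [List.getD_eq_getElem?_getD, List.getElem?_set_ne (Ne.symm h)]

theorem pvGetD_set_self {α : Type} [Inhabited α] (l : List α) (i : Nat) (v d : α) (h : i < l.length) :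
    (l.set i v).getD i d = v := by
  simp [List.getD_eq_getElem?_getD, h]

theorem pvGetD_append_left {α : Type} [Inhabited α] (l r : List α) (i : Nat) (d : α) (h : i < l.length) :
    (l ++ r).getD i d = l.getD i d := by
  simp [List.getD_eq_getElem?_getD, List.getElem?_append_left h]

theorem pvGetD_append_length {α : Type} [Inhabited α] (l : List α) (x d : α) :
    (l ++ [x]).getD l.length d = x := by
  simp [List.getD_eq_getElem?_getD]

theorem pvSet_append_left {α : Type} (l r : List α) (i : Nat) (v : α) (h : i < l.length) :
    (l ++ r).set i v = l.set i v ++ r := by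
  rw [List.set_append]; simp [h]

theorem pvIndex?_lt {α : Type} [BEq α] [LawfulBEq α] (l : List α) (v : α) (k : Nat)
    (h : PySem.List.index? l v = some k) : k < l.length := by
  obtain ⟨hk, _, _⟩ := PySem.List.getElem_of_index?_eq_some h; exact hk

theorem pvIndex?_mem {α : Type} [BEq α] [LawfulBEq α] (l : List α) (v : α) (k : Nat)
    (h : PySem.List.index? l v = some k) : v ∈ l := by
  rw [← PySem.List.index?_isSome_iff, h]; rfl

theorem pvIndex?_not_mem {α : Type} [BEq α] [LawfulBEq α] (l : List α) (v : α)
    (h : PySem.List.index? l v = none) : v ∉ l := by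
  rw [← PySem.List.index?_eq_none_iff]; exact h

theorem pvIndex?_getElem {α : Type} [BEq α] [LawfulBEq α] (l : List α) (v : α) (k : Nat)
    (h : PySem.List.index? l v = some k) (hk : k < l.length) : l[k] = v := by
  obtain ⟨hk', h1, _⟩ := PySem.List.getElem_of_index?_eq_some h; exact h1

theorem pvMem_set {α : Type} (l : List α) (i : Nat) (v x : α) (h : x ∈ l.set i v) :
    x = v ∨ x ∈ l := by
  obtain ⟨j, hj, hx⟩ := List.mem_iff_getElem.mp h
  by_cases hji : j = i
  · subst hji
    rw [List.getElem_set_self] at hx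
    exact Or.inl hx.symm
  · right
    rw [List.getElem_set_ne (by omega)] at hx
    exact hx ▸ List.getElem_mem _

-- --- structural facts about A's steps ---
theorem pvIcd_fst (ti : Nat) (t : PvTrip) (cc : Int × Int) : (pvIcd ti t cc).1 = t.1 := by
  unfold pvIcd; split <;> rfl

theorem pvIcdFold_fst (ti : Nat) (l : List (Int × Int)) (t : PvTrip) :
    (l.foldl (pvIcd ti) t).1 = t.1 := by
  induction l generalizing t with
  | nil => rfl
  | cons x xs ih => simp only [List.foldl_cons, ih, pvIcd_fst]

theorem pvIcd_lenInv (ti : Nat) (t : PvTrip) (cc : Int × Int) (h : pvLenInv t) :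
    pvLenInv (pvIcd ti t cc) := by
  unfold pvIcd; split
  · exact h
  · exact ⟨by simp [h.1], by simp [h.2]⟩

theorem pvIcdFold_lenInv (ti : Nat) (l : List (Int × Int)) (t : PvTrip) (h : pvLenInv t) :
    pvLenInv (l.foldl (pvIcd ti) t) := by
  induction l generalizing t with
  | nil => exact h
  | cons x xs ih => exact ih _ (pvIcd_lenInv _ _ _ h)

theorem pvMergeClass_fst (pix : PvTrip) (t : PvTrip) (ck : Int) :
    (pvMergeClass pix t ck).1 = t.1 ∨ (pvMergeClass pix t ck).1 = t.1 ++ [ck] := by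
  unfold pvMergeClass; split
  · exact Or.inl (pvIcdFold_fst _ _ _)
  · exact Or.inr rfl

theorem pvMergeClass_lenInv (pix : PvTrip) (t : PvTrip) (ck : Int) (h : pvLenInv t) :
    pvLenInv (pvMergeClass pix t ck) := by
  unfold pvMergeClass; split
  · exact pvIcdFold_lenInv _ _ _ h
  · exact ⟨by simp [h.1], by simp [h.2]⟩

theorem pvMergeFold_fst (pix : PvTrip) (L : List Int) (t : PvTrip) :
    ∃ ext, (L.foldl (pvMergeClass pix) t).1 = t.1 ++ ext := by
  induction L generalizing t with
  | nil => exact ⟨[], by simp⟩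
  | cons x xs ih =>
      simp only [List.foldl_cons]
      obtain ⟨e1, he1⟩ := ih (pvMergeClass pix t x)
      rcases pvMergeClass_fst pix t x with h | h
      · exact ⟨e1, by rw [he1, h]⟩
      · exact ⟨[x] ++ e1, by rw [he1, h, List.append_assoc]⟩

theorem pvMergeFold_lenInv (pix : PvTrip) (L : List Int) (t : PvTrip) (h : pvLenInv t) :
    pvLenInv (L.foldl (pvMergeClass pix) t) := by
  induction L generalizing t with
  | nil => exact h
  | cons x xs ih => exact ih _ (pvMergeClass_lenInv _ _ _ h)

theorem pvMergeFold_index? (pix : PvTrip) (L : List Int) (t : PvTrip) (k : Int) (ti : Nat)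
    (h : PySem.List.index? t.1 k = some ti) :
    PySem.List.index? (L.foldl (pvMergeClass pix) t).1 k = some ti := by
  obtain ⟨ext, hext⟩ := pvMergeFold_fst pix L t
  rw [hext, PySem.List.index?_append_of_mem ext (pvIndex?_mem _ _ _ h), h]

theorem pvTripStep_lenInv (t : PvTrip) (e : Int × (Int × Int)) (h : pvLenInv t) :
    pvLenInv (tripStep t e) := by
  unfold tripStep; split
  · exact pvIcd_lenInv _ _ _ h
  · exact ⟨by simp [h.1], by simp [h.2]⟩

theorem pvTripFold_lenInv (es : List (Int × (Int × Int))) (t : PvTrip) (h : pvLenInv t) :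
    pvLenInv (es.foldl tripStep t) := by
  induction es generalizing t with
  | nil => exact h
  | cons x xs ih => exact ih _ (pvTripStep_lenInv _ _ h)

-- --- the per-pixel builder as a fold of pvGroupStep over the pixel's events ---
theorem pv_can_go_eq (w h height width : Int) (q : Int × Int) :
    can_go h w height width none q.1 q.2 = pvGuardQ width height (w, h) q := by
  simp only [can_go, pvGuardQ]
  rw [show ∀ a b : Bool, a = b ↔ (a = true ↔ b = true) from fun a b => by
    constructor <;> intro hh <;> [rw [hh]; exact Bool.coe_iff_coe.mp hh]]
  simp only [Bool.and_eq_true, decide_eq_true_eq]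
  omega

theorem pv_pixlist_eq (dc : List (List Int)) (W H w h : Int) :
    get_around_pixel_list dc W H w h =
      (pixEvents dc W H (w, h)).foldl pvGroupStep ([], [], []) := by
  unfold get_around_pixel_list pixEvents
  rw [List.foldl_map, ← PySem.List.foldl_if_eq_foldl_filter]
  apply PySem.List.foldl_congr_mem
  intro acc q _
  rw [pv_can_go_eq w h H W q]

-- --- commuting one dedup-insert past later merge steps ---
theorem pvIcd_comm (ti tj : Nat) (h : ti ≠ tj) (t : PvTrip) (c cc : Int × Int) :
    pvIcd tj (pvIcd ti t c) cc = pvIcd ti (pvIcd tj t cc) c := by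
  obtain ⟨ks, ns, cs⟩ := t
  simp only [pvIcd, List.getD_eq_getElem?_getD]
  split_ifs <;>
    simp_all [List.set_comm _ _ h, List.getElem?_set_ne h, List.getElem?_set_ne (Ne.symm h)]

theorem pvIcdFold_comm (ti tj : Nat) (h : ti ≠ tj) (l : List (Int × Int)) (t : PvTrip) (c : Int × Int) :
    l.foldl (pvIcd tj) (pvIcd ti t c) = pvIcd ti (l.foldl (pvIcd tj) t) c := by
  induction l generalizing t with
  | nil => rfl
  | cons x xs ih => rw [List.foldl_cons, List.foldl_cons, pvIcd_comm ti tj h, ih]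

theorem pvComm_step (pix : PvTrip) (j k : Int) (c : Int × Int) (ti : Nat) (u : PvTrip)
    (hj : j ≠ k) (hti : PySem.List.index? u.1 k = some ti) (hlen : pvLenInv u) :
    pvMergeClass pix (pvIcd ti u c) j = pvIcd ti (pvMergeClass pix u j) c := by
  have hti_lt : ti < u.1.length := pvIndex?_lt _ _ _ hti
  have hk : u.1[ti] = k := pvIndex?_getElem _ _ _ hti hti_lt
  unfold pvMergeClass
  rw [pvIcd_fst]
  cases hm : PySem.List.index? u.1 j with
  | some tj =>
      have htj_lt : tj < u.1.length := pvIndex?_lt _ _ _ hm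
      have hne : ti ≠ tj := by
        intro hEq
        subst hEq
        exact hj ((pvIndex?_getElem _ _ _ hm htj_lt).symm.trans hk)
      simp only [pvIcdFold_comm ti tj hne]
  | none =>
      obtain ⟨ks, ns, cs⟩ := u
      simp only at hti_lt hk
      obtain ⟨hn, hc⟩ := hlen
      simp only at hn hc
      simp only [pvIcd, pvGetD_append_left cs _ ti _ (by omega),
        pvGetD_append_left ns _ ti _ (by omega)]
      split_ifs with h1
      · rfl
      · simp only [Prod.mk.injEq, true_and]
        constructor <;> rw [pvSet_append_left _ _ ti _ (by omega)]

theorem pvComm_fold (pix : PvTrip) (S : List Int) (k : Int) (c : Int × Int) (ti : Nat) :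
    ∀ (u : PvTrip), (∀ j ∈ S, j ≠ k) → PySem.List.index? u.1 k = some ti → pvLenInv u →
    S.foldl (pvMergeClass pix) (pvIcd ti u c) = pvIcd ti (S.foldl (pvMergeClass pix) u) c := by
  induction S with
  | nil => intro u _ _ _; rfl
  | cons j S' ih =>
      intro u hS hti hlen
      rw [List.foldl_cons, List.foldl_cons,
        pvComm_step pix j k c ti u (hS j (by simp)) hti hlen]
      refine ih (pvMergeClass pix u j) (fun x hx => hS x (by simp [hx])) ?_
        (pvMergeClass_lenInv _ _ _ hlen)
      rcases pvMergeClass_fst pix u j with h | h <;> rw [h]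
      · exact hti
      · rw [PySem.List.index?_append_of_mem _ (pvIndex?_mem _ _ _ hti)]; exact hti

-- merging a class j is insensitive to pixel-triple changes at another class's slot
theorem pvMergeClass_congr_set (ks ns : List Int) (cs : List (List (Int × Int))) (i : Nat)
    (x : Int) (y : List (Int × Int)) (j : Int) (u : PvTrip) (hmem : j ∈ ks)
    (hne : PySem.List.index? ks j ≠ some i) :
    pvMergeClass (ks, ns.set i x, cs.set i y) u j = pvMergeClass (ks, ns, cs) u j := by
  obtain ⟨tj, htj⟩ : ∃ tj, PySem.List.index? ks j = some tj := by
    have := PySem.List.index?_isSome_iff (xs := ks) (v := j)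
    cases hmm : PySem.List.index? ks j
    · rw [hmm] at this; simp [hmem] at this
    · exact ⟨_, rfl⟩
  have hne' : tj ≠ i := by intro h; exact hne (h ▸ htj)
  unfold pvMergeClass
  simp only [htj, Option.getD_some]
  cases PySem.List.index? u.1 j <;>
    simp only [pvGetD_set_ne cs i tj _ _ hne', pvGetD_set_ne ns i tj _ _ hne']

theorem pvMergeClass_congr_append (ks ns : List Int) (cs : List (List (Int × Int))) (k0 : Int)
    (a : Int) (b : List (Int × Int)) (j : Int) (u : PvTrip) (hmem : j ∈ ks)
    (hn : ns.length = ks.length) (hc : cs.length = ks.length) :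
    pvMergeClass (ks ++ [k0], ns ++ [a], cs ++ [b]) u j = pvMergeClass (ks, ns, cs) u j := by
  obtain ⟨tj, htj⟩ : ∃ tj, PySem.List.index? ks j = some tj := by
    have := PySem.List.index?_isSome_iff (xs := ks) (v := j)
    cases hmm : PySem.List.index? ks j
    · rw [hmm] at this; simp [hmem] at this
    · exact ⟨_, rfl⟩
  have htj_lt : tj < ks.length := pvIndex?_lt _ _ _ htj
  unfold pvMergeClass
  simp only [PySem.List.index?_append_of_mem _ hmem, htj, Option.getD_some]
  cases PySem.List.index? u.1 j <;>
    simp only [pvGetD_append_left cs _ tj _ (by omega), pvGetD_append_left ns _ tj _ (by omega)]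

theorem pvSet_append_length {α : Type} (l : List α) (x v : α) :
    (l ++ [x]).set l.length v = l ++ [v] := by
  rw [List.set_append]; simp

theorem pvGetD_mem {α : Type} [Inhabited α] (l : List α) (i : Nat) (d : α) (h : i < l.length) :
    l.getD i d ∈ l := by
  rw [List.getD_eq_getElem?_getD, List.getElem?_eq_getElem h]
  exact List.getElem_mem h

-- one event merged after the whole pixel-so-far equals the whole pixel-so-far merged, then the event
theorem pvC (e : Int × (Int × Int)) (t s : PvTrip) (hInv : pvInv t) (hs : pvLenInv s)
    (hc : e.2 ∉ t.2.2.flatten) :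
    (pvGroupStep t e).1.foldl (pvMergeClass (pvGroupStep t e)) s
      = tripStep (t.1.foldl (pvMergeClass t) s) e := by
  obtain ⟨ks, ns, cs⟩ := t
  obtain ⟨hnd, hn, hcl⟩ := hInv
  simp only at hnd hn hcl hc
  simp only [pvGroupStep]
  cases hk : PySem.List.index? ks e.1 with
  | some i =>
      have hi_lt : i < ks.length := pvIndex?_lt _ _ _ hk
      have hksi : ks[i] = e.1 := pvIndex?_getElem _ _ _ hk hi_lt
      obtain ⟨P, S, hPS, hPlen, hPnm⟩ := (PySem.List.index?_eq_some_iff ks e.1 i).mp hk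
      subst hPS
      have hS_ne : ∀ j ∈ S, j ≠ e.1 := by
        have h1 : (e.1 :: S).Nodup := hnd.of_append_right
        intro j hj hEq
        exact (List.nodup_cons.mp h1).1 (hEq ▸ hj)
      have hidx_ne : ∀ j, j ≠ e.1 →
          PySem.List.index? (P ++ e.1 :: S) j ≠ some i := by
        intro j hj hEq
        exact hj (((pvIndex?_getElem _ _ _ hEq hi_lt)).symm.trans hksi ▸ rfl)
      simp only [List.foldl_append, List.foldl_cons]
      -- prefix P: congruence
      have hPfold :
          P.foldl (pvMergeClass (P ++ e.1 :: S, ns.set i (ns.getD i 0 + 1),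
              cs.set i (cs.getD i [] ++ [e.2]))) s
            = P.foldl (pvMergeClass (P ++ e.1 :: S, ns, cs)) s := by
        apply PySem.List.foldl_congr_mem
        intro acc j hj
        have hjne : j ≠ e.1 := fun hEq => hPnm (hEq ▸ hj)
        exact pvMergeClass_congr_set _ ns cs i _ _ j acc
          (List.mem_append_left _ hj) (hidx_ne j hjne)
      rw [hPfold]
      set u₁ := P.foldl (pvMergeClass (P ++ e.1 :: S, ns, cs)) s with hu₁
      have hu₁len : pvLenInv u₁ := pvMergeFold_lenInv _ _ _ hs
      have hbatch : (cs.set i (cs.getD i [] ++ [e.2])).getD i [] = cs.getD i [] ++ [e.2] :=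
        pvGetD_set_self _ _ _ _ (by omega)
      have hnum : (ns.set i (ns.getD i 0 + 1)).getD i 0 = ns.getD i 0 + 1 :=
        pvGetD_set_self _ _ _ _ (by omega)
      have hl_nm : e.2 ∉ cs.getD i [] := by
        intro hmm
        exact hc (List.mem_flatten.mpr ⟨_, pvGetD_mem cs i [] (by omega), hmm⟩)
      have hSfold : ∀ v : PvTrip,
          S.foldl (pvMergeClass (P ++ e.1 :: S, ns.set i (ns.getD i 0 + 1),
              cs.set i (cs.getD i [] ++ [e.2]))) v
            = S.foldl (pvMergeClass (P ++ e.1 :: S, ns, cs)) v := by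
        intro v
        apply PySem.List.foldl_congr_mem
        intro acc j hj
        exact pvMergeClass_congr_set _ ns cs i _ _ j acc
          (List.mem_append_right _ (by simp [hj])) (hidx_ne j (hS_ne j hj))
      cases hm : PySem.List.index? u₁.1 e.1 with
      | some ti =>
          have hmid :
              pvMergeClass (P ++ e.1 :: S, ns.set i (ns.getD i 0 + 1),
                  cs.set i (cs.getD i [] ++ [e.2])) u₁ e.1
                = pvIcd ti (pvMergeClass (P ++ e.1 :: S, ns, cs) u₁ e.1) e.2 := by
            unfold pvMergeClass
            simp only [hk, Option.getD_some, hm, hbatch, List.foldl_append, List.foldl_cons,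
              List.foldl_nil]
          rw [hmid, hSfold]
          set v := pvMergeClass (P ++ e.1 :: S, ns, cs) u₁ e.1 with hv
          have hvidx : PySem.List.index? v.1 e.1 = some ti := by
            rcases pvMergeClass_fst (P ++ e.1 :: S, ns, cs) u₁ e.1 with h | h <;> rw [hv, h]
            · exact hm
            · rw [PySem.List.index?_append_of_mem _ (pvIndex?_mem _ _ _ hm)]; exact hm
          rw [pvComm_fold _ S e.1 e.2 ti v hS_ne hvidx
            (pvMergeClass_lenInv _ _ _ hu₁len)]
          unfold tripStep
          rw [pvMergeFold_index? _ S v e.1 ti hvidx]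
      | none =>
          have he1 : e.1 ∉ u₁.1 := pvIndex?_not_mem _ _ hm
          have hA : (u₁.2.2 ++ [cs.getD i []]).getD u₁.1.length [] = cs.getD i [] := by
            rw [← hu₁len.2]; exact pvGetD_append_length _ _ _
          have hB : (u₁.2.1 ++ [ns.getD i 0]).getD u₁.1.length 0 = ns.getD i 0 := by
            rw [← hu₁len.1]; exact pvGetD_append_length _ _ _
          have hmid :
              pvMergeClass (P ++ e.1 :: S, ns.set i (ns.getD i 0 + 1),
                  cs.set i (cs.getD i [] ++ [e.2])) u₁ e.1
                = pvIcd u₁.1.length (pvMergeClass (P ++ e.1 :: S, ns, cs) u₁ e.1) e.2 := by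
            unfold pvMergeClass
            simp only [hk, Option.getD_some, hm, hbatch, hnum]
            unfold pvIcd
            simp only [hA, hB]
            rw [if_neg hl_nm]
            simp only [Prod.mk.injEq, true_and]
            constructor
            · rw [← hu₁len.1, pvSet_append_length]
            · rw [← hu₁len.2, pvSet_append_length]
          rw [hmid, hSfold]
          set v := pvMergeClass (P ++ e.1 :: S, ns, cs) u₁ e.1 with hv
          have hvfst : v.1 = u₁.1 ++ [e.1] := by
            rw [hv]
            unfold pvMergeClass
            rw [hm]
          have hvidx : PySem.List.index? v.1 e.1 = some u₁.1.length := by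
            rw [hvfst]
            exact PySem.List.index?_append_singleton_self _ _ he1
          rw [pvComm_fold _ S e.1 e.2 _ v hS_ne hvidx (pvMergeClass_lenInv _ _ _ hu₁len)]
          unfold tripStep
          rw [pvMergeFold_index? _ S v e.1 _ hvidx]
  | none =>
      have he1ks : e.1 ∉ ks := pvIndex?_not_mem _ _ hk
      simp only [List.foldl_append, List.foldl_cons, List.foldl_nil]
      have hfold :
          ks.foldl (pvMergeClass (ks ++ [e.1], ns ++ [0], cs ++ [[e.2]])) s
            = ks.foldl (pvMergeClass (ks, ns, cs)) s := by
        apply PySem.List.foldl_congr_mem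
        intro acc j hj
        exact pvMergeClass_congr_append ks ns cs e.1 0 [e.2] j acc hj hn hcl
      rw [hfold]
      set u₂ := ks.foldl (pvMergeClass (ks, ns, cs)) s with hu₂
      have hstep : pvMergeClass (ks ++ [e.1], ns ++ [0], cs ++ [[e.2]]) u₂ e.1
          = tripStep u₂ e := by
        have hA : (cs ++ [[e.2]]).getD ks.length ([] : List (Int × Int)) = [e.2] := by
          rw [← hcl]; exact pvGetD_append_length _ _ _
        have hB : (ns ++ [(0 : Int)]).getD ks.length 0 = 0 := by
          rw [← hn]; exact pvGetD_append_length _ _ _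
        unfold pvMergeClass tripStep
        rw [PySem.List.index?_append_singleton_self _ _ he1ks]
        simp only [Option.getD_some, hA, hB]
        cases hm : PySem.List.index? u₂.1 e.1 <;>
          simp only [List.foldl_cons, List.foldl_nil]
      rw [hstep]

theorem pvGroupStep_inv (t : PvTrip) (e : Int × (Int × Int)) (h : pvInv t) :
    pvInv (pvGroupStep t e) := by
  obtain ⟨hnd, hn, hc⟩ := h
  unfold pvGroupStep
  cases hk : PySem.List.index? t.1 e.1
  · refine ⟨?_, by simp [hn], by simp [hc]⟩
    have hne1 := pvIndex?_not_mem _ _ hk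
    simp only [List.nodup_append, List.nodup_cons]
    refine ⟨hnd, by simp, ?_⟩
    intro a ha b hb
    rintro rfl
    exact hne1 ((by simpa using hb : a = e.1) ▸ ha)
  · exact ⟨hnd, by simp [hn], by simp [hc]⟩

theorem pvGroupStep_flatten (t : PvTrip) (e : Int × (Int × Int)) (h : pvInv t) (x : Int × Int)
    (hx : x ∈ (pvGroupStep t e).2.2.flatten) : x = e.2 ∨ x ∈ t.2.2.flatten := by
  obtain ⟨_, _, hc⟩ := h
  unfold pvGroupStep at hx
  cases hk : PySem.List.index? t.1 e.1 with
  | some i =>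
      rw [hk] at hx
      simp only [List.mem_flatten] at hx
      obtain ⟨l, hl, hxl⟩ := hx
      rcases pvMem_set _ _ _ _ hl with rfl | hl'
      · rcases List.mem_append.mp hxl with h1 | h1
        · exact Or.inr (List.mem_flatten.mpr ⟨_,
            pvGetD_mem _ i [] (by rw [hc]; exact pvIndex?_lt _ _ _ hk), h1⟩)
        · simpa using Or.inl (by simpa using h1)
      · exact Or.inr (List.mem_flatten.mpr ⟨l, hl', hxl⟩)
  | none =>
      rw [hk] at hx
      simp only [List.flatten_append, List.mem_append] at hx
      rcases hx with h1 | h1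
      · exact Or.inr h1
      · simpa using Or.inl (by simpa using h1)

theorem pvM (es : List (Int × (Int × Int))) : ∀ (t s : PvTrip), pvInv t → pvLenInv s →
    (∀ c ∈ es.map (·.2), c ∉ t.2.2.flatten) → (es.map (·.2)).Nodup →
    (es.foldl pvGroupStep t).1.foldl (pvMergeClass (es.foldl pvGroupStep t)) s
      = es.foldl tripStep (t.1.foldl (pvMergeClass t) s) := by
  induction es with
  | nil => intro t s _ _ _ _; rfl
  | cons e es ih =>
      intro t s hInv hs hfresh hnd
      simp only [List.foldl_cons]
      rw [ih (pvGroupStep t e) s (pvGroupStep_inv t e hInv) hs ?_ ?_,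
        pvC e t s hInv hs (by exact hfresh e.2 (by simp))]
      · intro c hcmem hcontra
        rcases pvGroupStep_flatten t e hInv c hcontra with rfl | hmem
        · simp only [List.map_cons, List.nodup_cons] at hnd
          exact hnd.1 hcmem
        · exact hfresh c (by simp; right; simpa using hcmem) hmem
      · simp only [List.map_cons, List.nodup_cons] at hnd
        exact hnd.2

theorem pvEventsCoords_nodup (dc : List (List Int)) (W H : Int) (p : Int × Int) :
    ((pixEvents dc W H p).map (·.2)).Nodup := by
  unfold pixEvents
  rw [List.map_map]
  have hsub : ((pvDiffs.filter (pvGuardQ W H p)).map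
        ((·.2) ∘ fun q => (pvCell dc (p.2 + q.1) (p.1 + q.2), (p.1 + q.2, p.2 + q.1)))).Sublist
      (pvDiffs.map ((·.2) ∘ fun q => (pvCell dc (p.2 + q.1) (p.1 + q.2), (p.1 + q.2, p.2 + q.1)))) :=
    List.filter_sublist.map _
  refine hsub.nodup ?_
  simp only [pvDiffs, Function.comp, List.map_cons, List.map_nil, List.nodup_cons,
    List.mem_cons, List.not_mem_nil, or_false, Prod.mk.injEq, List.nodup_nil]
  norm_num
  try omega

theorem pvAtotal (dc : List (List Int)) (W H : Int) (cb : List (Int × Int)) : ∀ s, pvLenInv s →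
    cb.foldl (fun t coord =>
      (get_around_pixel_list dc W H coord.1 coord.2).1.foldl
        (pvMergeClass (get_around_pixel_list dc W H coord.1 coord.2)) t) s
      = (cb.flatMap (pixEvents dc W H)).foldl tripStep s := by
  induction cb with
  | nil => intro s _; rfl
  | cons p cb ih =>
      intro s hs
      simp only [List.foldl_cons, List.flatMap_cons, List.foldl_append]
      rw [show (get_around_pixel_list dc W H p.1 p.2).1.foldl
            (pvMergeClass (get_around_pixel_list dc W H p.1 p.2)) s
          = (pixEvents dc W H p).foldl tripStep s from ?_]
      · exact ih _ (pvTripFold_lenInv _ _ hs)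
      · rw [pv_pixlist_eq]
        have := pvM (pixEvents dc W H (p.1, p.2)) ([], [], []) s
          ⟨List.nodup_nil, rfl, rfl⟩ hs (by simp) (pvEventsCoords_nodup dc W H (p.1, p.2))
        simpa using this

-- --- B's collection loop is the same flat event fold on a dict ---
theorem pvBpix (dc : List (List Int)) (W H : Int) (p : Int × Int)
    (d : PySem.Dict Int (List (Int × Int))) :
    pvDiffs.foldl (fun d q =>
        if decide (0 ≤ p.2 + q.1) && decide (p.2 + q.1 < H) && decide (0 ≤ p.1 + q.2) && decide (p.1 + q.2 < W) then
          pvAddCoord dc d p q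
        else d) d
      = (pixEvents dc W H p).foldl dictStep d := by
  unfold pixEvents
  rw [List.foldl_map, ← PySem.List.foldl_if_eq_foldl_filter]
  apply PySem.List.foldl_congr_mem
  intro acc q _
  rfl

theorem pvBtotal (dc : List (List Int)) (W H : Int) (cb : List (Int × Int)) :
    ∀ (d : PySem.Dict Int (List (Int × Int))),
    cb.foldl (fun d p =>
      pvDiffs.foldl (fun d q =>
        if decide (0 ≤ p.2 + q.1) && decide (p.2 + q.1 < H) && decide (0 ≤ p.1 + q.2) && decide (p.1 + q.2 < W) then
          pvAddCoord dc d p q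
        else d) d) d
      = (cb.flatMap (pixEvents dc W H)).foldl dictStep d := by
  induction cb with
  | nil => intro d; rfl
  | cons p cb ih =>
      intro d
      simp only [List.foldl_cons, List.flatMap_cons, List.foldl_append]
      rw [pvBpix, ih]

-- --- the relation between A's triple and B's dict is preserved by each event ---
theorem pvZipMap_id (ks : List Int) (cs : List (List (Int × Int))) (k : Int)
    (v : List (Int × Int)) (hk : k ∉ ks) :
    (ks.zip cs).map (fun p => if p.1 == k then (k, v) else p) = ks.zip cs := by
  induction ks generalizing cs with
  | nil => simp
  | cons a ks ih =>
      cases cs with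
      | nil => simp
      | cons c cs =>
          simp only [List.zip_cons_cons, List.map_cons]
          rw [if_neg (by simp; intro h; exact hk (by simp [h])), ih _ (fun h => hk (by simp [h]))]

theorem pvZip_replace (ks : List Int) (cs : List (List (Int × Int))) (i : Nat) (k : Int)
    (v : List (Int × Int)) (hnd : ks.Nodup) (hi : i < ks.length) (hk : ks[i] = k)
    (hlen : cs.length = ks.length) :
    (ks.zip cs).map (fun p => if p.1 == k then (k, v) else p) = ks.zip (cs.set i v) := by
  induction ks generalizing cs i with
  | nil => simp at hi
  | cons a ks ih =>
      cases cs with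
      | nil => simp at hlen
      | cons c cs =>
          cases i with
          | zero =>
              simp only [List.getElem_cons_zero] at hk
              subst hk
              simp only [List.zip_cons_cons, List.map_cons, List.set_cons_zero]
              rw [if_pos (by simp)]
              rw [pvZipMap_id ks cs a v (List.nodup_cons.mp hnd).1]
          | succ i =>
              have hne : a ≠ k := by
                intro h
                subst h
                exact (List.nodup_cons.mp hnd).1 (hk ▸ List.getElem_mem (by simpa using hi))
              simp only [List.zip_cons_cons, List.map_cons, List.set_cons_succ]
              rw [if_neg (by simpa using hne),
                ih cs i (List.nodup_cons.mp hnd).2 (by simpa using hi) (by simpa using hk)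
                  (by simpa using hlen)]

theorem pvRelStep (t : PvTrip) (d : PySem.Dict Int (List (Int × Int)))
    (e : Int × (Int × Int)) (h : pvRel t d) : pvRel (tripStep t e) (dictStep d e) := by
  obtain ⟨ks, ns, cs⟩ := t
  obtain ⟨hitems, hns, hnd, hn, hcl⟩ := h
  simp only at hitems hns hnd hn hcl
  have hkeys : d.keys = ks := by
    show d.items.map (·.1) = ks
    rw [hitems]; exact List.map_fst_zip (by omega)
  unfold tripStep dictStep
  cases hk : PySem.List.index? ks e.1 with
  | some i =>
      have hi_lt : i < ks.length := pvIndex?_lt _ _ _ hk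
      have hksi : ks[i] = e.1 := pvIndex?_getElem _ _ _ hk hi_lt
      have hgetD : d.getD e.1 [] = cs.getD i [] := by
        refine PySem.Dict.getD_of_mem_items d ?_ (by rw [hkeys]; exact hnd) []
        rw [hitems]
        have hz : i < (ks.zip cs).length := by simp [List.length_zip]; omega
        rw [List.getD_eq_getElem?_getD, List.getElem?_eq_getElem (by omega), Option.getD_some]
        have hzi : (ks.zip cs)[i] = (e.1, cs[i]'(by omega)) := by
          rw [List.getElem_zip, hksi]
        exact hzi ▸ List.getElem_mem hz
      have hcontains : d.contains e.1 = true := by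
        rw [PySem.Dict.contains_eq_decide_mem_keys, hkeys]
        simp [pvIndex?_mem _ _ _ hk]
      unfold pvIcd
      simp only [hgetD]
      have hset_add : PySem.Set.add (cs.getD i []) e.2
          = if e.2 ∈ cs.getD i [] then cs.getD i [] else cs.getD i [] ++ [e.2] := by
        simp [PySem.Set.add, PySem.Set.contains]
      by_cases hmem : e.2 ∈ cs.getD i []
      · rw [if_pos hmem]
        refine ⟨?_, hns, hnd, hn, hcl⟩
        rw [PySem.Dict.items_insert_of_contains d _ hcontains, hset_add, if_pos hmem, hitems,
          pvZip_replace ks cs i e.1 _ hnd hi_lt hksi hcl,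
          show cs.set i (cs.getD i []) = cs from by
            rw [List.getD_eq_getElem?_getD, List.getElem?_eq_getElem (by omega), Option.getD_some,
              List.set_getElem_self]]
      · rw [if_neg hmem]
        refine ⟨?_, ?_, hnd, by simpa using hn, by simpa using hcl⟩
        · rw [PySem.Dict.items_insert_of_contains d _ hcontains, hset_add, if_neg hmem, hitems,
            pvZip_replace ks cs i e.1 _ hnd hi_lt hksi hcl]
        · simp only
          rw [hns, List.map_set]
          congr 1
          have h1 : (List.map (fun l => ((l.length : Int) - 1)) cs).getD i 0
              = ((cs[i]'(by omega)).length : Int) - 1 := by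
            rw [List.getD_eq_getElem?_getD,
              List.getElem?_eq_getElem (by simpa using (by omega : i < cs.length)),
              Option.getD_some, List.getElem_map]
          have h2 : cs.getD i [] = cs[i]'(by omega) := by
            rw [List.getD_eq_getElem?_getD, List.getElem?_eq_getElem (by omega), Option.getD_some]
          rw [h1, h2]
          simp only [List.length_append, List.length_cons, List.length_nil]
          push_cast
          ring
  | none =>
      have hnotmem : e.1 ∉ ks := pvIndex?_not_mem _ _ hk
      have hcontains : d.contains e.1 = false := by
        rw [PySem.Dict.contains_eq_decide_mem_keys, hkeys]
        simp [hnotmem]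
      have hgetD : d.getD e.1 [] = [] := PySem.Dict.getD_of_not_contains d [] hcontains
      refine ⟨?_, ?_, ?_, by simpa using hn, by simpa using hcl⟩
      · rw [PySem.Dict.items_insert_of_not_contains d _ hcontains, hitems, hgetD]
        show ks.zip cs ++ [(e.1, PySem.Set.add [] e.2)] = (ks ++ [e.1]).zip (cs ++ [[e.2]])
        rw [List.zip_append (by omega)]
        rfl
      · simp only
        rw [hns, List.map_append]
        rfl
      · simpa [List.nodup_append] using ⟨hnd, fun a ha h => hnotmem (h ▸ ha)⟩

theorem pvRelFold (es : List (Int × (Int × Int))) :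
    ∀ (t : PvTrip) (d : PySem.Dict Int (List (Int × Int))), pvRel t d →
    pvRel (es.foldl tripStep t) (es.foldl dictStep d) := by
  induction es with
  | nil => intro t d h; exact h
  | cons e es ih => intro t d h; exact ih _ _ (pvRelStep t d e h)

-- --- the two final selection loops agree ---
def pvSelA (es : List (Int × Int)) (mc : Int) : Int × Int :=
  (PySem.List.pyRange 0 (es.length : Int) 1).foldl (fun st i =>
    if PySem.List.pyGetD (es.map (·.2)) i 0 > st.1 ∧ PySem.List.pyGetD (es.map (·.1)) i 0 ≠ mc then
      (PySem.List.pyGetD (es.map (·.2)) i 0, i)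
    else st) (-1, -1)

def pvSelB (es : List (Int × Int)) (mc : Int) : Int × Int :=
  es.foldl (fun st it => if it.1 ≠ mc ∧ it.2 > st.2 then (it.1, it.2) else st) (-1, -1)

theorem pvGetD_append_lt (l r : List Int) (i : Int) (d : Int) (h0 : 0 ≤ i) (h1 : i < l.length) :
    PySem.List.pyGetD (l ++ r) i d = PySem.List.pyGetD l i d := by
  rw [PySem.List.pyGetD_eq_getElem (l ++ r) d h0 (by simp; omega),
    PySem.List.pyGetD_eq_getElem l d h0 (by omega)]
  exact List.getElem_append_left (by omega)

theorem pvGetD_append_len (l : List Int) (x : Int) (d : Int) :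
    PySem.List.pyGetD (l ++ [x]) (l.length : Int) d = x := by
  rw [PySem.List.pyGetD_eq_getElem (l ++ [x]) d (by positivity) (by simp)]
  simp

theorem pvSel_char (es : List (Int × Int)) (mc : Int) :
    (pvSelA es mc).1 = (pvSelB es mc).2 ∧ -1 ≤ (pvSelA es mc).1 ∧
    ((pvSelA es mc).1 = -1 → (pvSelB es mc).1 = -1) ∧
    ((pvSelA es mc).1 ≠ -1 → 0 ≤ (pvSelA es mc).2 ∧ (pvSelA es mc).2 < (es.length : Int) ∧
      PySem.List.pyGetD (es.map (·.1)) (pvSelA es mc).2 0 = (pvSelB es mc).1) := by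
  induction es using List.reverseRecOn with
  | nil => exact ⟨rfl, by norm_num [pvSelA], by intro; rfl, by intro h; exact absurd rfl h⟩
  | append_singleton es e ih =>
      obtain ⟨ih1, ih2, ih3, ih4⟩ := ih
      have hlen : (((es ++ [e]).length : Nat) : Int) = (es.length : Int) + 1 := by simp
      have hA : pvSelA (es ++ [e]) mc =
          (if e.2 > (pvSelA es mc).1 ∧ e.1 ≠ mc then (e.2, (es.length : Int))
           else pvSelA es mc) := by
        unfold pvSelA
        rw [hlen, PySem.List.pyRange_one_succ_right (by positivity), List.foldl_append,
          List.foldl_cons, List.foldl_nil]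
        have hpre : (PySem.List.pyRange 0 (es.length : Int) 1).foldl (fun st i =>
            if PySem.List.pyGetD ((es ++ [e]).map (·.2)) i 0 > st.1 ∧
                PySem.List.pyGetD ((es ++ [e]).map (·.1)) i 0 ≠ mc then
              (PySem.List.pyGetD ((es ++ [e]).map (·.2)) i 0, i)
            else st) (-1, -1)
            = pvSelA es mc := by
          unfold pvSelA
          apply PySem.List.foldl_congr_mem
          intro acc i hi
          rw [PySem.List.mem_pyRange_one] at hi
          rw [List.map_append, List.map_append,
            pvGetD_append_lt _ _ i 0 hi.1 (by simpa using hi.2),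
            pvGetD_append_lt _ _ i 0 hi.1 (by simpa using hi.2)]
        rw [hpre, List.map_append, List.map_append]
        simp only [List.map_cons, List.map_nil]
        have g2 : PySem.List.pyGetD (List.map (fun x => x.2) es ++ [e.2]) (es.length : Int) 0 = e.2 := by
          have := pvGetD_append_len (List.map (fun x => x.2) es) e.2 0
          simpa using this
        have g1 : PySem.List.pyGetD (List.map (fun x => x.1) es ++ [e.1]) (es.length : Int) 0 = e.1 := by
          have := pvGetD_append_len (List.map (fun x => x.1) es) e.1 0
          simpa using this
        rw [g1, g2]
        rfl
      have hB : pvSelB (es ++ [e]) mc =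
          (if e.1 ≠ mc ∧ e.2 > (pvSelB es mc).2 then (e.1, e.2) else pvSelB es mc) := by
        unfold pvSelB
        rw [List.foldl_append, List.foldl_cons, List.foldl_nil]
      rw [hA, hB]
      by_cases hcond : e.2 > (pvSelA es mc).1 ∧ e.1 ≠ mc
      · rw [if_pos hcond, if_pos ⟨hcond.2, ih1 ▸ hcond.1⟩]
        refine ⟨rfl, by omega, by intro h; omega, ?_⟩
        intro _
        refine ⟨by positivity, by rw [hlen]; omega, ?_⟩
        rw [List.map_append]
        simp only [List.map_cons, List.map_nil]
        have := pvGetD_append_len (List.map (fun x => x.1) es) e.1 0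
        simpa using this
      · rw [if_neg hcond, if_neg (by rw [← ih1]; tauto)]
        refine ⟨ih1, ih2, ih3, ?_⟩
        intro h
        obtain ⟨h1, h2, h3⟩ := ih4 h
        refine ⟨h1, by rw [hlen]; omega, ?_⟩
        rw [List.map_append, pvGetD_append_lt _ _ _ 0 h1 (by simpa using h2)]
        exact h3

theorem pvFinal (t : PvTrip) (d : PySem.Dict Int (List (Int × Int))) (mc : Int) (h : pvRel t d) :
    (if ((PySem.List.pyRange 0 (t.2.1.length : Int) 1).foldl (fun st i =>
          if PySem.List.pyGetD t.2.1 i 0 > st.1 ∧ PySem.List.pyGetD t.1 i 0 ≠ mc then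
            (PySem.List.pyGetD t.2.1 i 0, i)
          else st) (-1, -1)).1 = -1 then (-1 : Int)
     else PySem.List.pyGetD t.1 ((PySem.List.pyRange 0 (t.2.1.length : Int) 1).foldl (fun st i =>
          if PySem.List.pyGetD t.2.1 i 0 > st.1 ∧ PySem.List.pyGetD t.1 i 0 ≠ mc then
            (PySem.List.pyGetD t.2.1 i 0, i)
          else st) (-1, -1)).2 0)
    = (d.items.foldl (fun st it =>
        if it.1 ≠ mc ∧ (it.2.length : Int) - 1 > st.2 then (it.1, (it.2.length : Int) - 1)
        else st) ((-1 : Int), (-1 : Int))).1 := by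
  obtain ⟨ks, ns, cs⟩ := t
  obtain ⟨hitems, hns, hnd, hn, hcl⟩ := h
  simp only at hitems hns hnd hn hcl ⊢
  have hmap1 : (ks.zip ns).map (·.1) = ks := List.map_fst_zip (by omega)
  have hmap2 : (ks.zip ns).map (·.2) = ns := List.map_snd_zip (by omega)
  have hzlen : ((ks.zip ns).length : Int) = (ns.length : Int) := by
    simp [List.length_zip]; omega
  have hselA : pvSelA (ks.zip ns) mc = (PySem.List.pyRange 0 (ns.length : Int) 1).foldl (fun st i =>
      if PySem.List.pyGetD ns i 0 > st.1 ∧ PySem.List.pyGetD ks i 0 ≠ mc then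
        (PySem.List.pyGetD ns i 0, i)
      else st) (-1, -1) := by
    unfold pvSelA
    rw [hmap1, hmap2, hzlen]
  have hes : ks.zip ns = (ks.zip cs).map (fun p => (p.1, ((p.2.length : Int) - 1))) := by
    rw [hns, List.zip_map_right]
    rfl
  have hselB : pvSelB (ks.zip ns) mc = (d.items.foldl (fun st it =>
      if it.1 ≠ mc ∧ (it.2.length : Int) - 1 > st.2 then (it.1, (it.2.length : Int) - 1)
      else st) ((-1 : Int), (-1 : Int))) := by
    rw [hitems, hes]
    unfold pvSelB
    rw [List.foldl_map]
  obtain ⟨c1, _, c3, c4⟩ := pvSel_char (ks.zip ns) mc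
  rw [← hselA, ← hselB]
  by_cases hz : (pvSelA (ks.zip ns) mc).1 = -1
  · rw [if_pos hz, c3 hz]
  · rw [if_neg hz]
    obtain ⟨_, _, h3⟩ := c4 hz
    rw [hmap1] at h3
    exact h3

-- ===== VERDICT (by name: the statement is the Claim_ definition above) =====
theorem get_around_largest_area_spec : Claim_equal_get_around_largest_area := by
  intro dc W H cb mc _ _
  unfold Spec_get_around_largest_area get_around_largest_area get_around_largest_area_alt
  simp only
  rw [pvAtotal dc W H cb ([], [], []) ⟨rfl, rfl⟩, pvBtotal dc W H cb PySem.Dict.empty]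
  exact pvFinal _ _ mc (pvRelFold _ _ _ ⟨rfl, rfl, List.nodup_nil, rfl, rfl⟩)
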